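-- pv_equiv track=rewrite | github.com/shahafabileah/wordle_analysis | solver.py | word_matches
-- ===== SOURCE A (Python) =====
-- def word_matches(word, attempted_word, colors):
--   # The logic is tricky in cases when the attempted word has a certain letter multiple times.
--   #
--   #   Example:
--   #     REUSE
--   #     YBBYG
--   # Note that 'E' is black in the second position and green in the last position.
--   #
--   # To account for this, we use the following approach:
--   # 1. Process the greens.  If the candidate_word matches, convert that position to '0' to
--   #    indicate that this position was used.
--   # 2. Process the yellows.  Again, whenever you match the letter, convert that position to
--   #    '0' to indicate that this position was used.
--   # 3. Process the blacks.  At this point if the given letter appears anywhere else in the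
--   #    word, it's safe to eliminate it.
--
--   # Changing to a list allows us to update characters as we go.
--   candidate_word = list(word)
--
--   # Greens
--   for i in range(0, 5):
--     if colors[i] == 'G':
--       # The candidate word must have the given letter in this position
--       if candidate_word[i] != attempted_word[i]:
--         return False
--
--       candidate_word[i] = '0'
--
--   # Yellows
--   for i in range(0, 5):
--     if colors[i] == 'Y':
--       # The candidate word must have the given letter somewhere
--       letter = attempted_word[i]
--       position = candidate_word.index(letter) if letter in candidate_word else -1
--       if position == -1:
--         return False
--
--       candidate_word[position] = '0'
--
--   # Blacks
--   for i in range(0, 5):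
--     if colors[i] == 'B':
--       # The candidate word must not have the given letter anywhere
--       if attempted_word[i] in candidate_word:
--         return False
--
--   return True
-- ===== SOURCE B (Python) =====
-- def word_matches(word, attempted_word, colors):
--   # One pass over positions 0..4 builds a per-letter constraint table:
--   # need[L]  = number of G/Y positions carrying letter L (occurrences the word must supply),
--   # capped   = letters that also occur at a B position (the word must supply EXACTLY need[L]).
--   # Green mismatches fail immediately during that pass.
--   need = {}
--   capped = set()
--   for i in range(0, 5):
--     c = colors[i]
--     if c == 'G':
--       if word[i] != attempted_word[i]:
--         return False
--       need[attempted_word[i]] = need.get(attempted_word[i], 0) + 1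
--     elif c == 'Y':
--       need[attempted_word[i]] = need.get(attempted_word[i], 0) + 1
--     elif c == 'B':
--       need.setdefault(attempted_word[i], 0)
--       capped.add(attempted_word[i])
--   # Letter frequencies of the full candidate word, then one check per constrained letter.
--   counts = {}
--   for ch in word:
--     counts[ch] = counts.get(ch, 0) + 1
--   for letter, n in need.items():
--     have = counts.get(letter, 0)
--     if have < n:
--       return False
--     if letter in capped and have > n:
--       return False
--   return True
-- ===== Notes on version B (the rewrite author's own statement) =====
-- stated objective: alternative
-- what changed: A simulates the guess by mutating a copy of the word (zeroing consumed positions, list.index scans in the yellow pass, membership scans in the black pass); B instead builds, in one pass over the five positions, a per-letter constraint table (required count per letter, plus a 'capped' set for black-marked letters), then verifies each constrained letter once against a letter-frequency table of the word. …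
-- outside the precondition, e.g. on word_matches('aabcd', 'a0xyz', 'GYBBB'): A returns True, B returns False; on word_matches('zzzzz', 'a', 'YBBBB'): A returns False, B raises IndexError
import Mathlib
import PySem

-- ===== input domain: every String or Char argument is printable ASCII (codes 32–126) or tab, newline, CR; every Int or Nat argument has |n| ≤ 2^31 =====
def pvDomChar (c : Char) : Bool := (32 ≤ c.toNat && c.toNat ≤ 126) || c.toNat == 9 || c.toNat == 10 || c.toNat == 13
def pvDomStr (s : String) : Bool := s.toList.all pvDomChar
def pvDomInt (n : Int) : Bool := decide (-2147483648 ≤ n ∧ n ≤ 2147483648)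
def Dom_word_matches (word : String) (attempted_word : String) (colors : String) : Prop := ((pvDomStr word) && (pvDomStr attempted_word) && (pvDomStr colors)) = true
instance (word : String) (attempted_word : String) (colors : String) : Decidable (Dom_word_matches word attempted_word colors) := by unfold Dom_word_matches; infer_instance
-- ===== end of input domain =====

-- B replaces A's mutate-and-scan simulation by a one-pass per-letter constraint table checked
-- once against letter frequencies of the word (objective: alternative, same cost class).

-- ===== PORT A =====
-- A's three passes over range(0,5), each a structural recursion over the remaining positions.
-- Result: none = IndexError (unreachable under Pre_), some none = `return False`,
-- some (some cand) = pass completed with the updated candidate list.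
def wmGreens (attempted : List Char) (colors : List Char) : List Nat → List Char → Option (Option (List Char))
  | [], cand => some (some cand)
  | i :: rest, cand =>
    match colors[i]? with
    | none => none
    | some c =>
      if c = 'G' then
        match cand[i]?, attempted[i]? with
        | some wc, some ac =>
          if wc ≠ ac then some none
          else wmGreens attempted colors rest (cand.set i '0')
        | _, _ => none
      else wmGreens attempted colors rest cand

def wmYellows (attempted : List Char) (colors : List Char) : List Nat → List Char → Option (Option (List Char))
  | [], cand => some (some cand)
  | i :: rest, cand =>
    match colors[i]? with
    | none => none
    | some c =>
      if c = 'Y' then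
        match attempted[i]? with
        | none => none
        | some letter =>
          let position : Int := if letter ∈ cand then ((PySem.List.index? cand letter).getD 0 : Int) else -1
          if position = -1 then some none
          else wmYellows attempted colors rest (PySem.List.pySetD cand position '0')
      else wmYellows attempted colors rest cand

def wmBlacks (attempted : List Char) (colors : List Char) : List Nat → List Char → Option Bool
  | [], _ => some true
  | i :: rest, cand =>
    match colors[i]? with
    | none => none
    | some c =>
      if c = 'B' then
        match attempted[i]? with
        | none => none
        | some letter => if letter ∈ cand then some false else wmBlacks attempted colors rest cand
      else wmBlacks attempted colors rest cand

def word_matches (word : String) (attempted_word : String) (colors : String) : Bool :=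
  match wmGreens attempted_word.toList colors.toList (List.range 5) word.toList with
  | none => false        -- IndexError: unreachable under Pre_
  | some none => false
  | some (some cand1) =>
    match wmYellows attempted_word.toList colors.toList (List.range 5) cand1 with
    | none => false      -- IndexError: unreachable under Pre_
    | some none => false
    | some (some cand2) =>
      match wmBlacks attempted_word.toList colors.toList (List.range 5) cand2 with
      | none => false    -- IndexError: unreachable under Pre_
      | some b => b

-- ===== PORT B =====
-- One pass over the five positions building need : letter → required count and capped : set of
-- black letters (green mismatches fail immediately); then one check per constrained letter.
def wbScan (word : List Char) (attempted : List Char) (colors : List Char) :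
    List Nat → PySem.Dict Char Int → PySem.Set Char → Option (Option (PySem.Dict Char Int × PySem.Set Char))
  | [], need, capped => some (some (need, capped))
  | i :: rest, need, capped =>
    match colors[i]? with
    | none => none       -- IndexError: unreachable under Pre_
    | some c =>
      if c = 'G' then
        match word[i]?, attempted[i]? with
        | some wc, some ac =>
          if wc ≠ ac then some none
          else wbScan word attempted colors rest (need.insert ac (need.getD ac 0 + 1)) capped
        | _, _ => none
      else if c = 'Y' then
        match attempted[i]? with
        | none => none
        | some ac => wbScan word attempted colors rest (need.insert ac (need.getD ac 0 + 1)) capped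
      else if c = 'B' then
        match attempted[i]? with
        | none => none
        | some ac => wbScan word attempted colors rest (need.setdefault ac 0) (PySem.Set.add capped ac)
      else wbScan word attempted colors rest need capped

def wbCheck (counts : PySem.Dict Char Int) (capped : PySem.Set Char) : List (Char × Int) → Bool
  | [] => true
  | (letter, n) :: rest =>
    let hv := counts.getD letter 0
    if hv < n then false
    else if PySem.Set.contains capped letter && decide (n < hv) then false
    else wbCheck counts capped rest

def word_matches_alt (word : String) (attempted_word : String) (colors : String) : Bool :=
  match wbScan word.toList attempted_word.toList colors.toList (List.range 5) PySem.Dict.empty PySem.Set.empty with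
  | none => false        -- IndexError: unreachable under Pre_
  | some none => false
  | some (some (need, capped)) =>
    let counts := word.toList.foldl (fun d ch => d.insert ch (d.getD ch 0 + 1)) PySem.Dict.empty
    wbCheck counts capped need.items

-- ===== PRECONDITION & SPEC =====
-- Pre_ admits (a) inputs where an early green mismatch returns False before any string runs out
-- (A and B both return False there), and (b) inputs long enough for all five positions
-- (colors, attempted_word of length ≥ 5; word covering every green position) whose first five
-- attempted letters avoid '0'.  Excluded, with cites in claim.json: inputs where a too-short
-- string makes A raise IndexError except when an early False preempts it (B may still raise
-- there), and inputs with '0' among the first five attempted letters, which collides with A's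
-- use of '0' as its consumed-position sentinel.
def Pre_word_matches (word : String) (attempted_word : String) (colors : String) : Prop :=
  (∃ i ∈ List.range 5,
      i < colors.toList.length ∧ colors.toList.getD i ' ' = 'G' ∧
      i < word.toList.length ∧ i < attempted_word.toList.length ∧
      word.toList.getD i ' ' ≠ attempted_word.toList.getD i ' ' ∧
      ∀ j ∈ List.range i,
        j < colors.toList.length ∧
        ((colors.toList.getD j ' ' = 'G' ∨ colors.toList.getD j ' ' = 'Y' ∨ colors.toList.getD j ' ' = 'B') →
          j < attempted_word.toList.length) ∧
        (colors.toList.getD j ' ' = 'G' →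
          j < word.toList.length ∧ word.toList.getD j ' ' = attempted_word.toList.getD j ' ')) ∨
  (5 ≤ colors.toList.length ∧ 5 ≤ attempted_word.toList.length ∧
   (∀ i ∈ List.range 5, colors.toList.getD i ' ' = 'G' → i < word.toList.length) ∧
   '0' ∉ attempted_word.toList.take 5)

instance (word : String) (attempted_word : String) (colors : String) : Decidable (Pre_word_matches word attempted_word colors) := by
  unfold Pre_word_matches; infer_instance

def pvWitness_word_matches : String × String × String := ("crane", "crane", "GGGGG")

def Spec_word_matches (word : String) (attempted_word : String) (colors : String) (out : Bool) : Prop := out = word_matches_alt word attempted_word colors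
instance (word : String) (attempted_word : String) (colors : String) (out : Bool) : Decidable (Spec_word_matches word attempted_word colors out) := by unfold Spec_word_matches; infer_instance

-- ===== CLAIM (what is proved, stated in full; the proofs are below) =====
def Claim_equal_word_matches : Prop := ∀ (word : String) (attempted_word : String) (colors : String), Dom_word_matches word attempted_word colors → Pre_word_matches word attempted_word colors → Spec_word_matches word attempted_word colors (word_matches word attempted_word colors)


-- ===== LEMMAS AND PROOFS =====

theorem range_split (i n : Nat) (h : i < n) :
    List.range n = List.range i ++ i :: (List.range (n - i - 1)).map (fun k => i + 1 + k) := by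
  have h1 : n = (i + 1) + (n - i - 1) := by omega
  rw [h1, List.range_add, List.range_succ]
  simp [List.append_assoc]
  ext1 k
  simp [Nat.add_comm, Nat.add_assoc, Nat.add_left_comm]

theorem countP_or_split (l : List Nat) (p q r : Nat → Prop) [DecidablePred p] [DecidablePred q] [DecidablePred r]
    (h : ∀ x ∈ l, ¬(p x ∧ q x)) :
    l.countP (fun x => decide ((p x ∨ q x) ∧ r x)) =
      l.countP (fun x => decide (p x ∧ r x)) + l.countP (fun x => decide (q x ∧ r x)) := by
  induction l with
  | nil => simp
  | cons a l ih =>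
    have ha := h a (by simp)
    have ih' := ih (fun x hx => h x (by simp [hx]))
    simp only [List.countP_cons, ih']
    by_cases hp : p a <;> by_cases hq : q a
    · exact absurd ⟨hp, hq⟩ ha
    all_goals by_cases hr : r a <;>
      simp only [hp, hq, hr, decide_true, decide_false, and_true, and_false, or_true, or_false,
        if_true, if_false, Bool.false_eq_true] <;> simp <;> omega

theorem count_set_zero (cand : List Char) (k : Nat) (hk : k < cand.length) (L : Char) (hL : L ≠ '0') :
    (cand.set k '0').count L = cand.count L - (if cand[k] = L then 1 else 0) := by
  have h0 : ('0' == L) = false := by rw [beq_eq_false_iff_ne]; exact Ne.symm hL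
  rw [List.count_set hk, h0]
  simp only [Bool.false_eq_true, if_false, Nat.add_zero]
  congr 1
  by_cases hx : cand[k] = L
  · simp [hx]
  · simp [hx]

theorem greens_good (T C : List Char) : ∀ (ps : List Nat) (cand : List Char), ps.Nodup →
    (∀ i ∈ ps, i < C.length ∧ (C.getD i ' ' = 'G' → i < cand.length ∧ i < T.length ∧ cand.getD i ' ' = T.getD i ' ')) →
    ∃ cand', wmGreens T C ps cand = some (some cand') ∧ cand'.length = cand.length ∧
      ∀ L : Char, L ≠ '0' →
        cand'.count L + ps.countP (fun i => decide (C.getD i ' ' = 'G' ∧ T.getD i ' ' = L)) = cand.count L := by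
  intro ps
  induction ps with
  | nil => intro cand _ _; exact ⟨cand, rfl, rfl, fun L _ => by simp⟩
  | cons i rest ih =>
    intro cand hnd h
    obtain ⟨hiC, hiG⟩ := h i (by simp)
    have hCi : C[i]? = some (C.getD i ' ') := by
      rw [List.getElem?_eq_getElem hiC, List.getD_eq_getElem _ _ hiC]
    rw [wmGreens, hCi]
    by_cases hG : C.getD i ' ' = 'G'
    · obtain ⟨hiW, hiT, heq⟩ := hiG hG
      have hWi : cand[i]? = some (cand.getD i ' ') := by
        rw [List.getElem?_eq_getElem hiW, List.getD_eq_getElem _ _ hiW]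
      have hTi : T[i]? = some (T.getD i ' ') := by
        rw [List.getElem?_eq_getElem hiT, List.getD_eq_getElem _ _ hiT]
      simp only [if_pos hG, hWi, hTi]
      rw [if_neg (fun hx => hx heq)]
      have hrest : ∀ j ∈ rest, j < C.length ∧ (C.getD j ' ' = 'G' →
          j < (cand.set i '0').length ∧ j < T.length ∧ (cand.set i '0').getD j ' ' = T.getD j ' ') := by
        intro j hj
        obtain ⟨h1, h2⟩ := h j (by simp [hj])
        refine ⟨h1, fun hg => ?_⟩
        obtain ⟨a1, a2, a3⟩ := h2 hg
        have hij : i ≠ j := fun hij => (List.nodup_cons.1 hnd).1 (hij ▸ hj)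
        refine ⟨by simpa using a1, a2, ?_⟩
        rw [List.getD_eq_getElem?_getD, List.getElem?_set_ne hij, ← List.getD_eq_getElem?_getD, a3]
      obtain ⟨cand', hrun, hlen, hcnt⟩ := ih (cand.set i '0') (List.nodup_cons.1 hnd).2 hrest
      refine ⟨cand', hrun, by simpa using hlen, fun L hL => ?_⟩
      have hset : (cand.set i '0').count L = cand.count L - (if cand.getD i ' ' = L then 1 else 0) := by
        have h0 : ('0' == L) = false := by
          rw [beq_eq_false_iff_ne]; exact Ne.symm hL
        rw [List.count_set hiW, h0]
        simp only [Bool.false_eq_true, if_false, Nat.add_zero]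
        congr 1
        rw [List.getD_eq_getElem _ _ hiW]
        by_cases hx : cand[i] = L
        · simp [hx]
        · simp [hx]
      have hpos : cand.getD i ' ' = L → 1 ≤ cand.count L := by
        intro hx
        have : L ∈ cand := by
          rw [← hx, List.getD_eq_getElem _ _ hiW]; exact List.getElem_mem hiW
        exact List.count_pos_iff.2 this
      have hcL := hcnt L hL
      rw [List.countP_cons]
      have hpred : (decide (C.getD i ' ' = 'G' ∧ T.getD i ' ' = L)) = decide (T.getD i ' ' = L) := by
        rw [decide_eq_decide]
        exact ⟨fun h => h.2, fun h => ⟨hG, h⟩⟩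
      rw [hpred]
      by_cases hTL : T.getD i ' ' = L
      · have hc : cand.getD i ' ' = L := heq.trans hTL
        have := hpos hc
        rw [hset, if_pos hc] at hcL
        rw [decide_eq_true hTL]
        simp only [if_true]
        omega
      · have hc : ¬ cand.getD i ' ' = L := fun hx => hTL (heq.symm.trans hx)
        rw [hset, if_neg hc] at hcL
        rw [decide_eq_false hTL]
        simp only [Bool.false_eq_true, if_false]
        omega
    · simp only [if_neg hG]
      obtain ⟨cand', hrun, hlen, hcnt⟩ := ih cand (List.nodup_cons.1 hnd).2 (fun j hj => h j (by simp [hj]))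
      refine ⟨cand', hrun, hlen, fun L hL => ?_⟩
      rw [List.countP_cons]
      have hx : (decide (C.getD i ' ' = 'G' ∧ T.getD i ' ' = L)) = false := by
        rw [decide_eq_false_iff_not]
        exact fun hh => hG hh.1
      rw [hx]
      simp only [Bool.false_eq_true, if_false, Nat.add_zero]
      exact hcnt L hL

theorem greens_bad (T C : List Char) : ∀ (ps₁ : List Nat) (i : Nat) (ps₂ : List Nat) (cand : List Char),
    (ps₁ ++ i :: ps₂).Nodup →
    (∀ j ∈ ps₁, j < C.length ∧ (C.getD j ' ' = 'G' → j < cand.length ∧ j < T.length ∧ cand.getD j ' ' = T.getD j ' ')) →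
    i < C.length → C.getD i ' ' = 'G' → i < cand.length → i < T.length → cand.getD i ' ' ≠ T.getD i ' ' →
    wmGreens T C (ps₁ ++ i :: ps₂) cand = some none := by
  intro ps₁
  induction ps₁ with
  | nil =>
    intro i ps₂ cand _ _ hiC hG hiW hiT hne
    have hCi : C[i]? = some (C.getD i ' ') := by
      rw [List.getElem?_eq_getElem hiC, List.getD_eq_getElem _ _ hiC]
    have hWi : cand[i]? = some (cand.getD i ' ') := by
      rw [List.getElem?_eq_getElem hiW, List.getD_eq_getElem _ _ hiW]
    have hTi : T[i]? = some (T.getD i ' ') := by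
      rw [List.getElem?_eq_getElem hiT, List.getD_eq_getElem _ _ hiT]
    rw [List.nil_append, wmGreens, hCi]
    simp only [if_pos hG, hWi, hTi]
    rw [if_pos (by simpa using hne)]
  | cons j rest ih =>
    intro i ps₂ cand hnd h hiC hG hiW hiT hne
    obtain ⟨hjC, hjG⟩ := h j (by simp)
    have hCj : C[j]? = some (C.getD j ' ') := by
      rw [List.getElem?_eq_getElem hjC, List.getD_eq_getElem _ _ hjC]
    rw [List.cons_append, wmGreens, hCj]
    have hflat := List.nodup_cons.mp (by rwa [List.cons_append] at hnd)
    have hnd' : (rest ++ i :: ps₂).Nodup := hflat.2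
    have hji : j ≠ i := fun hx => hflat.1 (by simp [hx])
    by_cases hGj : C.getD j ' ' = 'G'
    · obtain ⟨a1, a2, a3⟩ := hjG hGj
      have hWj : cand[j]? = some (cand.getD j ' ') := by
        rw [List.getElem?_eq_getElem a1, List.getD_eq_getElem _ _ a1]
      have hTj : T[j]? = some (T.getD j ' ') := by
        rw [List.getElem?_eq_getElem a2, List.getD_eq_getElem _ _ a2]
      simp only [if_pos hGj, hWj, hTj]
      rw [if_neg (fun hx => hx a3)]
      apply ih i ps₂ (cand.set j '0') hnd'
      · intro k hk
        obtain ⟨b1, b2⟩ := h k (by simp [hk])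
        refine ⟨b1, fun hg => ?_⟩
        obtain ⟨c1, c2, c3⟩ := b2 hg
        have hjk : j ≠ k := fun hx => hflat.1 (by simp [hx, hk])
        refine ⟨by simpa using c1, c2, ?_⟩
        rw [List.getD_eq_getElem?_getD, List.getElem?_set_ne hjk, ← List.getD_eq_getElem?_getD, c3]
      · exact hiC
      · exact hG
      · simpa using hiW
      · exact hiT
      · rw [List.getD_eq_getElem?_getD, List.getElem?_set_ne hji, ← List.getD_eq_getElem?_getD]
        exact hne
    · simp only [if_neg hGj]
      exact ih i ps₂ cand hnd' (fun k hk => h k (by simp [hk])) hiC hG hiW hiT hne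

theorem yellows_good (T C : List Char) : ∀ (ps : List Nat) (cand : List Char),
    (∀ i ∈ ps, i < C.length ∧ (C.getD i ' ' = 'Y' → i < T.length ∧ T.getD i ' ' ≠ '0')) →
    (∀ L : Char, ((ps.filter (fun i => decide (C.getD i ' ' = 'Y'))).map (fun i => T.getD i ' ')).count L ≤ cand.count L) →
    ∃ cand', wmYellows T C ps cand = some (some cand') ∧ cand'.length = cand.length ∧
      ∀ L : Char, L ≠ '0' →
        cand'.count L + ((ps.filter (fun i => decide (C.getD i ' ' = 'Y'))).map (fun i => T.getD i ' ')).count L = cand.count L := by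
  intro ps
  induction ps with
  | nil => intro cand _ _; exact ⟨cand, rfl, rfl, fun L _ => by simp⟩
  | cons i rest ih =>
    intro cand h hfeas
    obtain ⟨hiC, hiY⟩ := h i (by simp)
    have hCi : C[i]? = some (C.getD i ' ') := by
      rw [List.getElem?_eq_getElem hiC, List.getD_eq_getElem _ _ hiC]
    rw [wmYellows, hCi]
    by_cases hY : C.getD i ' ' = 'Y'
    · obtain ⟨hiT, h0i⟩ := hiY hY
      have hTi : T[i]? = some (T.getD i ' ') := by
        rw [List.getElem?_eq_getElem hiT, List.getD_eq_getElem _ _ hiT]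
      simp only [if_pos hY, hTi]
      have hfilter : (i :: rest).filter (fun j => decide (C.getD j ' ' = 'Y')) =
          i :: rest.filter (fun j => decide (C.getD j ' ' = 'Y')) :=
        List.filter_cons_of_pos (by exact decide_eq_true hY)
      have hys : ∀ L : Char,
          (((i :: rest).filter (fun j => decide (C.getD j ' ' = 'Y'))).map (fun j => T.getD j ' ')).count L =
          ((rest.filter (fun j => decide (C.getD j ' ' = 'Y'))).map (fun j => T.getD j ' ')).count L
            + (if T.getD i ' ' = L then 1 else 0) := by
        intro L
        rw [hfilter, List.map_cons, List.count_cons]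
        congr 1
        simp [beq_iff_eq]
      have hmem : T.getD i ' ' ∈ cand := by
        have := hfeas (T.getD i ' ')
        rw [hys] at this
        rw [if_pos rfl] at this
        exact List.count_pos_iff.1 (by omega)
      obtain ⟨k, hk⟩ := Option.isSome_iff_exists.1 ((PySem.List.index?_isSome_iff cand (T.getD i ' ')).2 hmem)
      obtain ⟨hklen, hcandk, -⟩ := PySem.List.getElem_of_index?_eq_some hk
      simp only [if_pos hmem, hk, Option.getD_some]
      rw [if_neg (by omega), PySem.List.pySetD_natCast]
      have htail : ∀ L : Char,
          ((rest.filter (fun j => decide (C.getD j ' ' = 'Y'))).map (fun j => T.getD j ' ')).count L ≤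
            (cand.set k '0').count L := by
        intro L
        by_cases hL : L = '0'
        · have : ((rest.filter (fun j => decide (C.getD j ' ' = 'Y'))).map (fun j => T.getD j ' ')).count L = 0 := by
            rw [List.count_eq_zero]
            intro hmemL
            obtain ⟨j, hj, hTj⟩ := List.mem_map.1 hmemL
            have hjY := (h j (by simp [List.mem_filter.1 hj |>.1])).2 (by simpa using (List.mem_filter.1 hj).2)
            exact hjY.2 (hTj.trans hL)
          omega
        · rw [count_set_zero cand k hklen L hL]
          have := hfeas L
          rw [hys] at this
          rw [hcandk]
          by_cases hx : T.getD i ' ' = L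
          · rw [if_pos hx] at this ⊢; omega
          · rw [if_neg hx] at this ⊢; omega
      obtain ⟨cand', hrun, hlen, hcnt⟩ := ih (cand.set k '0')
        (fun j hj => h j (by simp [hj])) htail
      refine ⟨cand', hrun, by simpa using hlen, fun L hL => ?_⟩
      rw [hys]
      have := hcnt L hL
      rw [count_set_zero cand k hklen L hL, hcandk] at this
      have hfL := hfeas L
      rw [hys] at hfL
      by_cases hx : T.getD i ' ' = L
      · rw [if_pos hx] at this hfL ⊢
        have hposL : 1 ≤ cand.count L := by
          apply List.count_pos_iff.2
          rw [← hx, ← hcandk]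
          exact List.getElem_mem hklen
        omega
      · rw [if_neg hx] at this hfL ⊢; omega
    · simp only [if_neg hY]
      have hfilter : (i :: rest).filter (fun j => decide (C.getD j ' ' = 'Y')) =
          rest.filter (fun j => decide (C.getD j ' ' = 'Y')) :=
        List.filter_cons_of_neg (by simp only [decide_eq_true_eq]; exact hY)
      obtain ⟨cand', hrun, hlen, hcnt⟩ := ih cand (fun j hj => h j (by simp [hj]))
        (by intro L; rw [← hfilter]; exact hfeas L)
      refine ⟨cand', hrun, hlen, fun L hL => ?_⟩
      rw [hfilter]
      exact hcnt L hL

theorem yellows_bad (T C : List Char) : ∀ (ps : List Nat) (cand : List Char),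
    (∀ i ∈ ps, i < C.length ∧ (C.getD i ' ' = 'Y' → i < T.length ∧ T.getD i ' ' ≠ '0')) →
    ¬ (∀ L : Char, ((ps.filter (fun i => decide (C.getD i ' ' = 'Y'))).map (fun i => T.getD i ' ')).count L ≤ cand.count L) →
    wmYellows T C ps cand = some none := by
  intro ps
  induction ps with
  | nil => intro cand _ hn; exact absurd (fun L => by simp) hn
  | cons i rest ih =>
    intro cand h hnfeas
    obtain ⟨hiC, hiY⟩ := h i (by simp)
    have hCi : C[i]? = some (C.getD i ' ') := by
      rw [List.getElem?_eq_getElem hiC, List.getD_eq_getElem _ _ hiC]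
    rw [wmYellows, hCi]
    by_cases hY : C.getD i ' ' = 'Y'
    · obtain ⟨hiT, h0i⟩ := hiY hY
      have hTi : T[i]? = some (T.getD i ' ') := by
        rw [List.getElem?_eq_getElem hiT, List.getD_eq_getElem _ _ hiT]
      simp only [if_pos hY, hTi]
      have hfilter : (i :: rest).filter (fun j => decide (C.getD j ' ' = 'Y')) =
          i :: rest.filter (fun j => decide (C.getD j ' ' = 'Y')) :=
        List.filter_cons_of_pos (by exact decide_eq_true hY)
      have hys : ∀ L : Char,
          (((i :: rest).filter (fun j => decide (C.getD j ' ' = 'Y'))).map (fun j => T.getD j ' ')).count L =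
          ((rest.filter (fun j => decide (C.getD j ' ' = 'Y'))).map (fun j => T.getD j ' ')).count L
            + (if T.getD i ' ' = L then 1 else 0) := by
        intro L
        rw [hfilter, List.map_cons, List.count_cons]
        congr 1
        simp [beq_iff_eq]
      by_cases hmem : T.getD i ' ' ∈ cand
      · obtain ⟨k, hk⟩ := Option.isSome_iff_exists.1 ((PySem.List.index?_isSome_iff cand (T.getD i ' ')).2 hmem)
        obtain ⟨hklen, hcandk, -⟩ := PySem.List.getElem_of_index?_eq_some hk
        simp only [if_pos hmem, hk, Option.getD_some]
        rw [if_neg (by omega), PySem.List.pySetD_natCast]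
        apply ih (cand.set k '0') (fun j hj => h j (by simp [hj]))
        intro htail
        apply hnfeas
        intro L
        rw [hys]
        by_cases hL : L = '0'
        · subst hL
          have hz : (((rest.filter (fun j => decide (C.getD j ' ' = 'Y'))).map (fun j => T.getD j ' ')).count '0') = 0 := by
            rw [List.count_eq_zero]
            intro hmemL
            obtain ⟨j, hj, hTj⟩ := List.mem_map.1 hmemL
            have hjY := (h j (by simp [List.mem_filter.1 hj |>.1])).2 (by simpa using (List.mem_filter.1 hj).2)
            exact hjY.2 hTj
          rw [if_neg h0i, hz]
          omega
        · have := htail L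
          rw [count_set_zero cand k hklen L hL, hcandk] at this
          have hpos : T.getD i ' ' = L → 1 ≤ cand.count L := by
            intro hx
            apply List.count_pos_iff.2
            rw [← hx, ← hcandk]
            exact List.getElem_mem hklen
          by_cases hx : T.getD i ' ' = L
          · rw [if_pos hx] at this ⊢; have := hpos hx; omega
          · rw [if_neg hx] at this ⊢; omega
      · rw [if_neg hmem, if_pos rfl]
    · simp only [if_neg hY]
      have hfilter : (i :: rest).filter (fun j => decide (C.getD j ' ' = 'Y')) =
          rest.filter (fun j => decide (C.getD j ' ' = 'Y')) :=
        List.filter_cons_of_neg (by simp only [decide_eq_true_eq]; exact hY)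
      apply ih cand (fun j hj => h j (by simp [hj]))
      intro htail
      apply hnfeas
      intro L
      rw [hfilter]
      exact htail L

theorem blacks_run (T C : List Char) : ∀ (ps : List Nat) (cand : List Char),
    (∀ i ∈ ps, i < C.length ∧ (C.getD i ' ' = 'B' → i < T.length)) →
    wmBlacks T C ps cand = some (decide (∀ i ∈ ps, C.getD i ' ' = 'B' → T.getD i ' ' ∉ cand)) := by
  intro ps
  induction ps with
  | nil => intro cand _; simp [wmBlacks]
  | cons i rest ih =>
    intro cand h
    obtain ⟨hiC, hiT⟩ := h i (by simp)
    have hCi : C[i]? = some (C.getD i ' ') := by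
      rw [List.getElem?_eq_getElem hiC]; rw [List.getD_eq_getElem _ _ hiC]
    rw [wmBlacks, hCi]
    by_cases hB : C.getD i ' ' = 'B'
    · have hT : T[i]? = some (T.getD i ' ') := by
        rw [List.getElem?_eq_getElem (hiT hB)]; rw [List.getD_eq_getElem _ _ (hiT hB)]
      simp only [if_pos hB, hT]
      by_cases hm : T.getD i ' ' ∈ cand
      · simp only [if_pos hm]
        have hdec : decide (∀ j ∈ (i :: rest), C.getD j ' ' = 'B' → T.getD j ' ' ∉ cand) = false := by
          simp only [decide_eq_false_iff_not]
          intro hh; exact (hh i (by simp) hB) hm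
        rw [hdec]
      · simp only [if_neg hm, ih cand (fun j hj => h j (by simp [hj]))]
        congr 1
        rw [decide_eq_decide]
        simp only [List.forall_mem_cons]
        constructor
        · intro hh; exact ⟨fun _ => hm, hh⟩
        · intro hh; exact hh.2
    · simp only [if_neg hB, ih cand (fun j hj => h j (by simp [hj]))]
      congr 1
      rw [decide_eq_decide]
      simp only [List.forall_mem_cons]
      constructor
      · intro hh; exact ⟨fun hb => absurd hb hB, hh⟩
      · intro hh; exact hh.2

theorem scan_good (W T C : List Char) : ∀ (ps : List Nat) (need : PySem.Dict Char Int) (capped : PySem.Set Char),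
    need.keys.Nodup →
    (∀ i ∈ ps, i < C.length ∧
      ((C.getD i ' ' = 'G' ∨ C.getD i ' ' = 'Y' ∨ C.getD i ' ' = 'B') → i < T.length) ∧
      (C.getD i ' ' = 'G' → i < W.length ∧ W.getD i ' ' = T.getD i ' ')) →
    ∃ need' capped', wbScan W T C ps need capped = some (some (need', capped')) ∧
      need'.keys.Nodup ∧
      (∀ L : Char, need'.getD L 0 = need.getD L 0 +
        (ps.countP (fun i => decide ((C.getD i ' ' = 'G' ∨ C.getD i ' ' = 'Y') ∧ T.getD i ' ' = L)) : Int)) ∧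
      (∀ L : Char, L ∈ need'.keys ↔ L ∈ need.keys ∨ ∃ i ∈ ps,
        (C.getD i ' ' = 'G' ∨ C.getD i ' ' = 'Y' ∨ C.getD i ' ' = 'B') ∧ T.getD i ' ' = L) ∧
      (∀ L : Char, L ∈ capped' ↔ L ∈ capped ∨ ∃ i ∈ ps, C.getD i ' ' = 'B' ∧ T.getD i ' ' = L) := by
  intro ps
  induction ps with
  | nil =>
    intro need capped hnd _
    exact ⟨need, capped, rfl, hnd, fun L => by simp, fun L => by simp, fun L => by simp⟩
  | cons i rest ih =>
    intro need capped hnd h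
    obtain ⟨hiC, hiT, hiG⟩ := h i (by simp)
    have hCi : C[i]? = some (C.getD i ' ') := by
      rw [List.getElem?_eq_getElem hiC, List.getD_eq_getElem _ _ hiC]
    rw [wbScan, hCi]
    have hrest : ∀ j ∈ rest, j < C.length ∧
        ((C.getD j ' ' = 'G' ∨ C.getD j ' ' = 'Y' ∨ C.getD j ' ' = 'B') → j < T.length) ∧
        (C.getD j ' ' = 'G' → j < W.length ∧ W.getD j ' ' = T.getD j ' ') :=
      fun j hj => h j (by simp [hj])
    by_cases hG : C.getD i ' ' = 'G'
    · obtain ⟨hiW, heq⟩ := hiG hG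
      have hTlen := hiT (Or.inl hG)
      have hWi : W[i]? = some (W.getD i ' ') := by
        rw [List.getElem?_eq_getElem hiW, List.getD_eq_getElem _ _ hiW]
      have hTi : T[i]? = some (T.getD i ' ') := by
        rw [List.getElem?_eq_getElem hTlen, List.getD_eq_getElem _ _ hTlen]
      simp only [if_pos hG, hWi, hTi]
      rw [if_neg (fun hx => hx heq)]
      obtain ⟨need', capped', hrun, hnd', hgetD, hkeys, hcap⟩ :=
        ih (need.insert (T.getD i ' ') (need.getD (T.getD i ' ') 0 + 1)) capped
          (PySem.Dict.nodup_keys_insert need _ _ hnd) hrest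
      refine ⟨need', capped', hrun, hnd', fun L => ?_, fun L => ?_, fun L => ?_⟩
      · rw [hgetD L, PySem.Dict.getD_insert, List.countP_cons]
        by_cases hx : T.getD i ' ' = L
        · rw [if_pos hx.symm]
          have : (decide ((C.getD i ' ' = 'G' ∨ C.getD i ' ' = 'Y') ∧ T.getD i ' ' = L)) = true :=
            decide_eq_true ⟨Or.inl hG, hx⟩
          rw [this, if_pos rfl, hx]
          push_cast; ring
        · rw [if_neg (fun hh => hx hh.symm)]
          have : (decide ((C.getD i ' ' = 'G' ∨ C.getD i ' ' = 'Y') ∧ T.getD i ' ' = L)) = false :=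
            decide_eq_false (fun hh => hx hh.2)
          rw [this]
          simp only [Bool.false_eq_true, if_false, Nat.add_zero]
      · rw [hkeys L, PySem.Dict.mem_keys_insert]
        constructor
        · rintro (( hx | hx) | hx)
          · exact Or.inr ⟨i, by simp, Or.inl hG, hx.symm⟩
          · exact Or.inl hx
          · obtain ⟨j, hj, hc, ht⟩ := hx; exact Or.inr ⟨j, by simp [hj], hc, ht⟩
        · rintro (hx | ⟨j, hj, hc, ht⟩)
          · exact Or.inl (Or.inr hx)
          · rcases List.mem_cons.1 hj with rfl | hj'
            · exact Or.inl (Or.inl ht.symm)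
            · exact Or.inr ⟨j, hj', hc, ht⟩
      · rw [hcap L]
        constructor
        · rintro (hx | ⟨j, hj, hc, ht⟩)
          · exact Or.inl hx
          · exact Or.inr ⟨j, by simp [hj], hc, ht⟩
        · rintro (hx | ⟨j, hj, hc, ht⟩)
          · exact Or.inl hx
          · rcases List.mem_cons.1 hj with rfl | hj'
            · exact absurd hG (by rw [hc]; decide)
            · exact Or.inr ⟨j, hj', hc, ht⟩
    · by_cases hY : C.getD i ' ' = 'Y'
      · have hTlen := hiT (Or.inr (Or.inl hY))
        have hTi : T[i]? = some (T.getD i ' ') := by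
          rw [List.getElem?_eq_getElem hTlen, List.getD_eq_getElem _ _ hTlen]
        simp only [if_neg hG, if_pos hY, hTi]
        obtain ⟨need', capped', hrun, hnd', hgetD, hkeys, hcap⟩ :=
          ih (need.insert (T.getD i ' ') (need.getD (T.getD i ' ') 0 + 1)) capped
            (PySem.Dict.nodup_keys_insert need _ _ hnd) hrest
        refine ⟨need', capped', hrun, hnd', fun L => ?_, fun L => ?_, fun L => ?_⟩
        · rw [hgetD L, PySem.Dict.getD_insert, List.countP_cons]
          by_cases hx : T.getD i ' ' = L
          · rw [if_pos hx.symm]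
            have : (decide ((C.getD i ' ' = 'G' ∨ C.getD i ' ' = 'Y') ∧ T.getD i ' ' = L)) = true :=
              decide_eq_true ⟨Or.inr hY, hx⟩
            rw [this, if_pos rfl, hx]
            push_cast; ring
          · rw [if_neg (fun hh => hx hh.symm)]
            have : (decide ((C.getD i ' ' = 'G' ∨ C.getD i ' ' = 'Y') ∧ T.getD i ' ' = L)) = false :=
              decide_eq_false (fun hh => hx hh.2)
            rw [this]
            simp only [Bool.false_eq_true, if_false, Nat.add_zero]
        · rw [hkeys L, PySem.Dict.mem_keys_insert]
          constructor
          · rintro ((hx | hx) | hx)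
            · exact Or.inr ⟨i, by simp, Or.inr (Or.inl hY), hx.symm⟩
            · exact Or.inl hx
            · obtain ⟨j, hj, hc, ht⟩ := hx; exact Or.inr ⟨j, by simp [hj], hc, ht⟩
          · rintro (hx | ⟨j, hj, hc, ht⟩)
            · exact Or.inl (Or.inr hx)
            · rcases List.mem_cons.1 hj with rfl | hj'
              · exact Or.inl (Or.inl ht.symm)
              · exact Or.inr ⟨j, hj', hc, ht⟩
        · rw [hcap L]
          constructor
          · rintro (hx | ⟨j, hj, hc, ht⟩)
            · exact Or.inl hx
            · exact Or.inr ⟨j, by simp [hj], hc, ht⟩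
          · rintro (hx | ⟨j, hj, hc, ht⟩)
            · exact Or.inl hx
            · rcases List.mem_cons.1 hj with rfl | hj'
              · exact absurd hY (by rw [hc]; decide)
              · exact Or.inr ⟨j, hj', hc, ht⟩
      · by_cases hB : C.getD i ' ' = 'B'
        · have hTlen := hiT (Or.inr (Or.inr hB))
          have hTi : T[i]? = some (T.getD i ' ') := by
            rw [List.getElem?_eq_getElem hTlen, List.getD_eq_getElem _ _ hTlen]
          simp only [if_neg hG, if_neg hY, if_pos hB, hTi]
          have hnds : (need.setdefault (T.getD i ' ') 0).keys.Nodup := by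
            rw [PySem.Dict.keys_setdefault]
            by_cases hc : need.contains (T.getD i ' ') = true
            · rw [if_pos hc]; exact hnd
            · rw [if_neg hc]
              refine List.Nodup.append hnd (List.nodup_singleton _) ?_
              intro a ha hb
              rw [List.mem_singleton] at hb
              subst hb
              exact hc ((PySem.Dict.contains_iff_mem_keys need _).2 ha)
          obtain ⟨need', capped', hrun, hnd', hgetD, hkeys, hcap⟩ :=
            ih (need.setdefault (T.getD i ' ') 0) (PySem.Set.add capped (T.getD i ' ')) hnds hrest
          refine ⟨need', capped', hrun, hnd', fun L => ?_, fun L => ?_, fun L => ?_⟩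
          · rw [hgetD L, List.countP_cons]
            have hsd : (need.setdefault (T.getD i ' ') 0).getD L 0 = need.getD L 0 := by
              by_cases hx : L = T.getD i ' '
              · rw [hx]; exact PySem.Dict.getD_setdefault_self need _ 0 0
              · rw [PySem.Dict.getD_eq_get?_getD, PySem.Dict.get?_setdefault_of_ne need 0 hx,
                  ← PySem.Dict.getD_eq_get?_getD]
            have : (decide ((C.getD i ' ' = 'G' ∨ C.getD i ' ' = 'Y') ∧ T.getD i ' ' = L)) = false :=
              decide_eq_false (fun hh => by
                rcases hh.1 with hx | hx
                · exact hG hx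
                · exact hY hx)
            rw [hsd, this]
            simp only [Bool.false_eq_true, if_false, Nat.add_zero]
          · rw [hkeys L]
            have hmemsd : L ∈ (need.setdefault (T.getD i ' ') 0).keys ↔ L ∈ need.keys ∨ L = T.getD i ' ' := by
              rw [PySem.Dict.keys_setdefault]
              by_cases hc : need.contains (T.getD i ' ') = true
              · rw [if_pos hc]
                constructor
                · exact Or.inl
                · rintro (hx | rfl)
                  · exact hx
                  · exact (PySem.Dict.contains_iff_mem_keys need _).1 hc
              · rw [if_neg hc]
                simp [List.mem_append]
            rw [hmemsd]
            constructor
            · rintro ((hx | hx) | hx)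
              · exact Or.inl hx
              · exact Or.inr ⟨i, by simp, Or.inr (Or.inr hB), hx.symm⟩
              · obtain ⟨j, hj, hc, ht⟩ := hx; exact Or.inr ⟨j, by simp [hj], hc, ht⟩
            · rintro (hx | ⟨j, hj, hc, ht⟩)
              · exact Or.inl (Or.inl hx)
              · rcases List.mem_cons.1 hj with rfl | hj'
                · exact Or.inl (Or.inr ht.symm)
                · exact Or.inr ⟨j, hj', hc, ht⟩
          · rw [hcap L]
            rw [PySem.Set.mem_add]
            constructor
            · rintro ((hx | hx) | hx)
              · exact Or.inl hx
              · exact Or.inr ⟨i, by simp, hB, hx.symm⟩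
              · obtain ⟨j, hj, hc, ht⟩ := hx; exact Or.inr ⟨j, by simp [hj], hc, ht⟩
            · rintro (hx | ⟨j, hj, hc, ht⟩)
              · exact Or.inl (Or.inl hx)
              · rcases List.mem_cons.1 hj with rfl | hj'
                · exact Or.inl (Or.inr ht.symm)
                · exact Or.inr ⟨j, hj', hc, ht⟩
        · simp only [if_neg hG, if_neg hY, if_neg hB]
          obtain ⟨need', capped', hrun, hnd', hgetD, hkeys, hcap⟩ := ih need capped hnd hrest
          refine ⟨need', capped', hrun, hnd', fun L => ?_, fun L => ?_, fun L => ?_⟩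
          · rw [hgetD L, List.countP_cons]
            have : (decide ((C.getD i ' ' = 'G' ∨ C.getD i ' ' = 'Y') ∧ T.getD i ' ' = L)) = false :=
              decide_eq_false (fun hh => by
                rcases hh.1 with hx | hx
                · exact hG hx
                · exact hY hx)
            rw [this]
            simp only [Bool.false_eq_true, if_false, Nat.add_zero]
          · rw [hkeys L]
            constructor
            · rintro (hx | ⟨j, hj, hc, ht⟩)
              · exact Or.inl hx
              · exact Or.inr ⟨j, by simp [hj], hc, ht⟩
            · rintro (hx | ⟨j, hj, hc, ht⟩)
              · exact Or.inl hx
              · rcases List.mem_cons.1 hj with rfl | hj'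
                · rcases hc with hx | hx | hx
                  · exact absurd hx hG
                  · exact absurd hx hY
                  · exact absurd hx hB
                · exact Or.inr ⟨j, hj', hc, ht⟩
          · rw [hcap L]
            constructor
            · rintro (hx | ⟨j, hj, hc, ht⟩)
              · exact Or.inl hx
              · exact Or.inr ⟨j, by simp [hj], hc, ht⟩
            · rintro (hx | ⟨j, hj, hc, ht⟩)
              · exact Or.inl hx
              · rcases List.mem_cons.1 hj with rfl | hj'
                · exact absurd hc hB
                · exact Or.inr ⟨j, hj', hc, ht⟩

theorem scan_bad (W T C : List Char) : ∀ (ps₁ : List Nat) (i : Nat) (ps₂ : List Nat)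
    (need : PySem.Dict Char Int) (capped : PySem.Set Char),
    (∀ j ∈ ps₁, j < C.length ∧
      ((C.getD j ' ' = 'G' ∨ C.getD j ' ' = 'Y' ∨ C.getD j ' ' = 'B') → j < T.length) ∧
      (C.getD j ' ' = 'G' → j < W.length ∧ W.getD j ' ' = T.getD j ' ')) →
    i < C.length → C.getD i ' ' = 'G' → i < W.length → i < T.length → W.getD i ' ' ≠ T.getD i ' ' →
    wbScan W T C (ps₁ ++ i :: ps₂) need capped = some none := by
  intro ps₁
  induction ps₁ with
  | nil =>
    intro i ps₂ need capped _ hiC hG hiW hiT hne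
    have hCi : C[i]? = some (C.getD i ' ') := by
      rw [List.getElem?_eq_getElem hiC, List.getD_eq_getElem _ _ hiC]
    have hWi : W[i]? = some (W.getD i ' ') := by
      rw [List.getElem?_eq_getElem hiW, List.getD_eq_getElem _ _ hiW]
    have hTi : T[i]? = some (T.getD i ' ') := by
      rw [List.getElem?_eq_getElem hiT, List.getD_eq_getElem _ _ hiT]
    rw [List.nil_append, wbScan, hCi]
    simp only [if_pos hG, hWi, hTi]
    rw [if_pos (by simpa using hne)]
  | cons j rest ih =>
    intro i ps₂ need capped h hiC hG hiW hiT hne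
    obtain ⟨hjC, hjT, hjG⟩ := h j (by simp)
    have hCj : C[j]? = some (C.getD j ' ') := by
      rw [List.getElem?_eq_getElem hjC, List.getD_eq_getElem _ _ hjC]
    rw [List.cons_append, wbScan, hCj]
    have hrest : ∀ k ∈ rest, k < C.length ∧
        ((C.getD k ' ' = 'G' ∨ C.getD k ' ' = 'Y' ∨ C.getD k ' ' = 'B') → k < T.length) ∧
        (C.getD k ' ' = 'G' → k < W.length ∧ W.getD k ' ' = T.getD k ' ') :=
      fun k hk => h k (by simp [hk])
    by_cases hGj : C.getD j ' ' = 'G'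
    · obtain ⟨a1, a2⟩ := hjG hGj
      have hTlen := hjT (Or.inl hGj)
      have hWj : W[j]? = some (W.getD j ' ') := by
        rw [List.getElem?_eq_getElem a1, List.getD_eq_getElem _ _ a1]
      have hTj : T[j]? = some (T.getD j ' ') := by
        rw [List.getElem?_eq_getElem hTlen, List.getD_eq_getElem _ _ hTlen]
      simp only [if_pos hGj, hWj, hTj]
      rw [if_neg (fun hx => hx a2)]
      exact ih i ps₂ _ _ hrest hiC hG hiW hiT hne
    · by_cases hYj : C.getD j ' ' = 'Y'
      · have hTlen := hjT (Or.inr (Or.inl hYj))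
        have hTj : T[j]? = some (T.getD j ' ') := by
          rw [List.getElem?_eq_getElem hTlen, List.getD_eq_getElem _ _ hTlen]
        simp only [if_neg hGj, if_pos hYj, hTj]
        exact ih i ps₂ _ _ hrest hiC hG hiW hiT hne
      · by_cases hBj : C.getD j ' ' = 'B'
        · have hTlen := hjT (Or.inr (Or.inr hBj))
          have hTj : T[j]? = some (T.getD j ' ') := by
            rw [List.getElem?_eq_getElem hTlen, List.getD_eq_getElem _ _ hTlen]
          simp only [if_neg hGj, if_neg hYj, if_pos hBj, hTj]
          exact ih i ps₂ _ _ hrest hiC hG hiW hiT hne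
        · simp only [if_neg hGj, if_neg hYj, if_neg hBj]
          exact ih i ps₂ _ _ hrest hiC hG hiW hiT hne

theorem check_iff (counts : PySem.Dict Char Int) (capped : PySem.Set Char) : ∀ l : List (Char × Int),
    wbCheck counts capped l = true ↔ ∀ p ∈ l, p.2 ≤ counts.getD p.1 0 ∧ ¬(p.1 ∈ capped ∧ p.2 < counts.getD p.1 0) := by
  intro l
  induction l with
  | nil => simp [wbCheck]
  | cons p rest ih =>
    obtain ⟨letter, n⟩ := p
    rw [wbCheck]
    simp only [List.forall_mem_cons]
    by_cases h1 : counts.getD letter 0 < n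
    · simp only [if_pos h1]
      constructor
      · intro h; exact absurd h (by simp)
      · rintro ⟨⟨hle, -⟩, -⟩; omega
    · rw [if_neg h1]
      by_cases hm : letter ∈ capped
      · have hc : PySem.Set.contains capped letter = true := (PySem.Set.contains_iff capped letter).2 hm
        by_cases h2 : n < counts.getD letter 0
        · have hcond : (PySem.Set.contains capped letter && decide (n < counts.getD letter 0)) = true := by
            rw [hc]; simp [h2]
          rw [hcond, if_pos rfl]
          constructor
          · intro h; exact absurd h (by simp)
          · rintro ⟨⟨-, hni⟩, -⟩; exact absurd ⟨hm, h2⟩ hni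
        · have hcond : (PySem.Set.contains capped letter && decide (n < counts.getD letter 0)) = false := by
            rw [hc]; simp [h2]
          rw [hcond, if_neg (by simp), ih]
          constructor
          · intro h; exact ⟨⟨by omega, fun hx => absurd hx.2 h2⟩, h⟩
          · intro h; exact h.2
      · have hc : PySem.Set.contains capped letter = false := by
          cases hq : PySem.Set.contains capped letter
          · rfl
          · exact absurd ((PySem.Set.contains_iff capped letter).1 hq) hm
        have hcond : (PySem.Set.contains capped letter && decide (n < counts.getD letter 0)) = false := by
          rw [hc]; simp
        rw [hcond, if_neg (by simp), ih]
        constructor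
        · intro h; exact ⟨⟨by omega, fun hx => absurd hx.1 hm⟩, h⟩
        · intro h; exact h.2


-- ===== VERDICT (by name: the statement is the Claim_ definition above) =====
theorem word_matches_spec : Claim_equal_word_matches := by
  unfold Claim_equal_word_matches
  intro word t c hdom hpre
  unfold Spec_word_matches
  rcases hpre with ⟨i, hir, hiC, hG, hiW, hiT, hne, hprev⟩ | ⟨hC5, hT5, hGW, h0⟩
  · -- early green mismatch: both programs return False at the same position
    have hi5 := List.mem_range.1 hir
    have hsplit := range_split i 5 hi5
    have hprev' : ∀ j ∈ List.range i, j < c.toList.length ∧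
        ((c.toList.getD j ' ' = 'G' ∨ c.toList.getD j ' ' = 'Y' ∨ c.toList.getD j ' ' = 'B') → j < t.toList.length) ∧
        (c.toList.getD j ' ' = 'G' → j < word.toList.length ∧ word.toList.getD j ' ' = t.toList.getD j ' ') :=
      fun j hj => hprev j hj
    have hg := greens_bad t.toList c.toList (List.range i) i ((List.range (5 - i - 1)).map (fun k => i + 1 + k)) word.toList
      (by rw [← hsplit]; exact List.nodup_range)
      (fun j hj => by
        obtain ⟨a1, a2, a3⟩ := hprev' j hj
        exact ⟨a1, fun hgj => ⟨(a3 hgj).1, a2 (Or.inl hgj), (a3 hgj).2⟩⟩)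
      hiC hG hiW hiT hne
    have hs := scan_bad word.toList t.toList c.toList (List.range i) i ((List.range (5 - i - 1)).map (fun k => i + 1 + k)) PySem.Dict.empty PySem.Set.empty
      hprev' hiC hG hiW hiT hne
    rw [← hsplit] at hg hs
    unfold word_matches word_matches_alt
    rw [hg, hs]
  · -- all five positions readable
    by_cases hgok : ∀ i ∈ List.range 5, c.toList.getD i ' ' = 'G' → word.toList.getD i ' ' = t.toList.getD i ' '
    · -- all greens match
      have hT0 : ∀ i, i < 5 → t.toList.getD i ' ' ≠ '0' := by
        intro i hi5
        have hiT : i < t.toList.length := by omega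
        rw [List.getD_eq_getElem _ _ hiT]
        intro hx
        apply h0
        have hlt : i < (t.toList.take 5).length := by rw [List.length_take]; omega
        have h2 : (t.toList.take 5)[i] = t.toList[i] := List.getElem_take
        rw [← hx, ← h2]
        exact List.getElem_mem hlt
      have hcondA : ∀ i ∈ List.range 5, i < c.toList.length ∧ (c.toList.getD i ' ' = 'G' →
          i < word.toList.length ∧ i < t.toList.length ∧ word.toList.getD i ' ' = t.toList.getD i ' ') := by
        intro i hir
        have hi5 := List.mem_range.1 hir
        exact ⟨by omega, fun hg => ⟨hGW i hir hg, by omega, hgok i hir hg⟩⟩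
      obtain ⟨cand1, hrun1, hlen1, hcnt1⟩ :=
        greens_good t.toList c.toList (List.range 5) word.toList List.nodup_range hcondA
      have hcondS : ∀ i ∈ List.range 5, i < c.toList.length ∧
          ((c.toList.getD i ' ' = 'G' ∨ c.toList.getD i ' ' = 'Y' ∨ c.toList.getD i ' ' = 'B') → i < t.toList.length) ∧
          (c.toList.getD i ' ' = 'G' → i < word.toList.length ∧ word.toList.getD i ' ' = t.toList.getD i ' ') := by
        intro i hir
        have hi5 := List.mem_range.1 hir
        exact ⟨by omega, fun _ => by omega, fun hg => ⟨hGW i hir hg, hgok i hir hg⟩⟩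
      obtain ⟨need', capped', hrunS, hndS, hgetD, hkeys, hcap⟩ :=
        scan_good word.toList t.toList c.toList (List.range 5) PySem.Dict.empty PySem.Set.empty
          (by rw [PySem.Dict.keys_empty]; exact List.nodup_nil) hcondS
      have hgetD' : ∀ L : Char, need'.getD L 0 =
          ((List.range 5).countP (fun i => decide ((c.toList.getD i ' ' = 'G' ∨ c.toList.getD i ' ' = 'Y') ∧ t.toList.getD i ' ' = L)) : Int) := by
        intro L
        rw [hgetD L, PySem.Dict.getD_empty]
        ring
      have hkeys' : ∀ L : Char, L ∈ need'.keys ↔ ∃ i ∈ List.range 5,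
          (c.toList.getD i ' ' = 'G' ∨ c.toList.getD i ' ' = 'Y' ∨ c.toList.getD i ' ' = 'B') ∧ t.toList.getD i ' ' = L := by
        intro L
        rw [hkeys L, PySem.Dict.keys_empty]
        simp
      have hcap' : ∀ L : Char, L ∈ capped' ↔ ∃ i ∈ List.range 5,
          c.toList.getD i ' ' = 'B' ∧ t.toList.getD i ' ' = L := by
        intro L
        rw [hcap L]
        simp [PySem.Set.empty]
      have hcounts : ∀ L : Char,
          (word.toList.foldl (fun d ch => d.insert ch (d.getD ch 0 + 1)) PySem.Dict.empty).getD L 0 =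
            (word.toList.count L : Int) := by
        intro L
        rw [PySem.Dict.getD_foldl_insert_add_one, PySem.Dict.getD_empty]
        ring
      have hgy : ∀ L : Char,
          (List.range 5).countP (fun i => decide ((c.toList.getD i ' ' = 'G' ∨ c.toList.getD i ' ' = 'Y') ∧ t.toList.getD i ' ' = L)) =
          (List.range 5).countP (fun i => decide (c.toList.getD i ' ' = 'G' ∧ t.toList.getD i ' ' = L)) +
          (List.range 5).countP (fun i => decide (c.toList.getD i ' ' = 'Y' ∧ t.toList.getD i ' ' = L)) := by
        intro L
        exact countP_or_split (List.range 5) _ _ _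
          (fun x _ hx => by rw [hx.1] at hx; exact absurd hx.2 (by decide))
      have hysy : ∀ L : Char,
          (((List.range 5).filter (fun i => decide (c.toList.getD i ' ' = 'Y'))).map (fun i => t.toList.getD i ' ')).count L =
          (List.range 5).countP (fun i => decide (c.toList.getD i ' ' = 'Y' ∧ t.toList.getD i ' ' = L)) := by
        intro L
        rw [List.count_eq_countP, List.countP_map, List.countP_filter]
        apply List.countP_congr
        intro a _
        simp [Function.comp, and_comm]
      have hcondY : ∀ i ∈ List.range 5, i < c.toList.length ∧
          (c.toList.getD i ' ' = 'Y' → i < t.toList.length ∧ t.toList.getD i ' ' ≠ '0') := by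
        intro i hir
        have hi5 := List.mem_range.1 hir
        exact ⟨by omega, fun _ => ⟨by omega, hT0 i hi5⟩⟩
      have hcondB : ∀ i ∈ List.range 5, i < c.toList.length ∧
          (c.toList.getD i ' ' = 'B' → i < t.toList.length) := by
        intro i hir
        have hi5 := List.mem_range.1 hir
        exact ⟨by omega, fun _ => by omega⟩
      -- letters named by the table are not '0'
      have hkey0 : ∀ L : Char, L ∈ need'.keys → L ≠ '0' := by
        intro L hL
        obtain ⟨i, hir, -, ht⟩ := (hkeys' L).1 hL
        rw [← ht]
        exact hT0 i (List.mem_range.1 hir)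
      -- value of each table entry at a key, read off the items list
      have hitem : ∀ p ∈ need'.items, p.2 = need'.getD p.1 0 := by
        intro p hp
        obtain ⟨k, v⟩ := p
        exact (PySem.Dict.getD_of_get?_eq_some need' 0 (PySem.Dict.get?_of_mem_items need' hp hndS)).symm
      have hkey_item : ∀ L : Char, L ∈ need'.keys → ∃ p ∈ need'.items, p.1 = L := by
        intro L hL
        simp only [PySem.Dict.keys] at hL
        obtain ⟨p, hp, hfst⟩ := List.mem_map.1 hL
        exact ⟨p, hp, hfst⟩
      by_cases hfeas : ∀ L : Char,
          (((List.range 5).filter (fun i => decide (c.toList.getD i ' ' = 'Y'))).map (fun i => t.toList.getD i ' ')).count L ≤ cand1.count L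
      · obtain ⟨cand2, hrun2, hlen2, hcnt2⟩ :=
          yellows_good t.toList c.toList (List.range 5) cand1 hcondY hfeas
        have hblk := blacks_run t.toList c.toList (List.range 5) cand2 hcondB
        unfold word_matches word_matches_alt
        simp only [hrun1, hrun2, hblk, hrunS]
        rw [Bool.eq_iff_iff, decide_eq_true_eq, check_iff]
        constructor
        · -- A accepts → every table entry checks out
          intro hblack p hp
          have hpk := PySem.Dict.mem_keys_of_mem_items need' hp
          have hL0 := hkey0 p.1 hpk
          have hW : word.toList.count p.1 = cand2.count p.1 +
              (((List.range 5).filter (fun i => decide (c.toList.getD i ' ' = 'Y'))).map (fun i => t.toList.getD i ' ')).count p.1 +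
              (List.range 5).countP (fun i => decide (c.toList.getD i ' ' = 'G' ∧ t.toList.getD i ' ' = p.1)) := by
            have e1 := hcnt1 p.1 hL0
            have e2 := hcnt2 p.1 hL0
            omega
          rw [hitem p hp, hgetD', hcounts, hgy p.1]
          constructor
          · rw [hW, hysy]
            push_cast
            omega
          · rintro ⟨hcapL, hlt⟩
            obtain ⟨i, hir, hB, ht⟩ := (hcap' p.1).1 hcapL
            have hnotin : t.toList.getD i ' ' ∉ cand2 := hblack i hir hB
            have hz : cand2.count p.1 = 0 := List.count_eq_zero.2 (ht ▸ hnotin)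
            rw [hW, hysy, hz] at hlt
            push_cast at hlt
            omega
        · -- every table entry checks out → A accepts
          intro hchk i hir hB
          set L := t.toList.getD i ' ' with hLdef
          have hL0 : L ≠ '0' := hT0 i (List.mem_range.1 hir)
          have hLk : L ∈ need'.keys := (hkeys' L).2 ⟨i, hir, Or.inr (Or.inr hB), rfl⟩
          obtain ⟨p, hp, hfst⟩ := hkey_item L hLk
          have hv := hitem p hp
          have hc := hchk p hp
          rw [hv, hfst, hgetD', hcounts, hgy L] at hc
          have hcapL : L ∈ capped' := (hcap' L).2 ⟨i, hir, hB, rfl⟩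
          have e1 := hcnt1 L hL0
          have e2 := hcnt2 L hL0
          have hle : (word.toList.count L : Int) ≤
              ((List.range 5).countP (fun i => decide (c.toList.getD i ' ' = 'G' ∧ t.toList.getD i ' ' = L)) +
               (List.range 5).countP (fun i => decide (c.toList.getD i ' ' = 'Y' ∧ t.toList.getD i ' ' = L)) : Int) := by
            by_contra hgt
            exact hc.2 ⟨hcapL, by omega⟩
          have hz : cand2.count L = 0 := by
            rw [hysy] at e2
            push_cast at hle
            omega
          exact List.count_eq_zero.1 hz
      · have hyb := yellows_bad t.toList c.toList (List.range 5) cand1 hcondY hfeas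
        unfold word_matches word_matches_alt
        simp only [hrun1, hyb, hrunS]
        cases hval : wbCheck (word.toList.foldl (fun d ch => d.insert ch (d.getD ch 0 + 1)) PySem.Dict.empty) capped' need'.items
        · rfl
        · exfalso
          apply hfeas
          intro L
          by_cases hy0 : (List.range 5).countP (fun i => decide (c.toList.getD i ' ' = 'Y' ∧ t.toList.getD i ' ' = L)) = 0
          · rw [hysy, hy0]
            omega
          · have hpos : 0 < (List.range 5).countP (fun i => decide (c.toList.getD i ' ' = 'Y' ∧ t.toList.getD i ' ' = L)) := by omega
            obtain ⟨i, hir, hpi⟩ := List.countP_pos_iff.1 hpos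
            have hpi' := of_decide_eq_true hpi
            have hLk : L ∈ need'.keys := (hkeys' L).2 ⟨i, hir, Or.inr (Or.inl hpi'.1), hpi'.2⟩
            have hL0 := hkey0 L hLk
            obtain ⟨p, hp, hfst⟩ := hkey_item L hLk
            have hc := (check_iff _ capped' need'.items).1 hval p hp
            have hv := hitem p hp
            rw [hv, hfst, hgetD', hcounts, hgy L] at hc
            have e1 := hcnt1 L hL0
            have hle := hc.1
            rw [hysy]
            push_cast at hle
            omega
    · -- some green position mismatches: both programs fail at the first one
      have hex : ∃ i, i < 5 ∧ c.toList.getD i ' ' = 'G' ∧ word.toList.getD i ' ' ≠ t.toList.getD i ' ' := by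
        simp only [not_forall] at hgok
        obtain ⟨i, hir, hg, hne⟩ := hgok
        exact ⟨i, List.mem_range.1 hir, hg, hne⟩
      obtain ⟨hi5, hG, hne⟩ := Nat.find_spec hex
      have hmin := fun j (hj : j < Nat.find hex) => Nat.find_min hex hj
      have hsplit := range_split (Nat.find hex) 5 hi5
      have hiW : Nat.find hex < word.toList.length := hGW (Nat.find hex) (List.mem_range.2 hi5) hG
      have hprevA : ∀ j ∈ List.range (Nat.find hex), j < c.toList.length ∧
          (c.toList.getD j ' ' = 'G' → j < word.toList.length ∧ j < t.toList.length ∧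
            word.toList.getD j ' ' = t.toList.getD j ' ') := by
        intro j hj
        have hj0 := List.mem_range.1 hj
        have hj5 : j < 5 := by omega
        refine ⟨by omega, fun hg => ⟨hGW j (List.mem_range.2 hj5) hg, by omega, ?_⟩⟩
        by_contra hne'
        exact hmin j hj0 ⟨hj5, hg, hne'⟩
      have hprevS : ∀ j ∈ List.range (Nat.find hex), j < c.toList.length ∧
          ((c.toList.getD j ' ' = 'G' ∨ c.toList.getD j ' ' = 'Y' ∨ c.toList.getD j ' ' = 'B') → j < t.toList.length) ∧
          (c.toList.getD j ' ' = 'G' → j < word.toList.length ∧ word.toList.getD j ' ' = t.toList.getD j ' ') := by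
        intro j hj
        have hj0 := List.mem_range.1 hj
        have hj5 : j < 5 := by omega
        refine ⟨by omega, fun _ => by omega, fun hg => ⟨hGW j (List.mem_range.2 hj5) hg, ?_⟩⟩
        by_contra hne'
        exact hmin j hj0 ⟨hj5, hg, hne'⟩
      have hg2 := greens_bad t.toList c.toList (List.range (Nat.find hex)) (Nat.find hex)
        ((List.range (5 - Nat.find hex - 1)).map (fun k => Nat.find hex + 1 + k)) word.toList
        (by rw [← hsplit]; exact List.nodup_range) hprevA (by omega) hG hiW (by omega) hne
      have hs2 := scan_bad word.toList t.toList c.toList (List.range (Nat.find hex)) (Nat.find hex)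
        ((List.range (5 - Nat.find hex - 1)).map (fun k => Nat.find hex + 1 + k)) PySem.Dict.empty PySem.Set.empty
        hprevS (by omega) hG hiW (by omega) hne
      rw [← hsplit] at hg2 hs2
      unfold word_matches word_matches_alt
      rw [hg2, hs2]
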